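-- pv_equiv track=rewrite | github.com/Codedotexe/AOC-2020-Python | Day-10/main.py | figure_ways
-- ===== SOURCE A (Python) =====
-- def figure_ways(data):
-- 	if len(data) == 0:
-- 		return 0
-- 	if len(data) < 3:
-- 		return 1
-- 	ways = 0
-- 	ways += figure_ways(data[1:])
-- 	ways += figure_ways(data[2:])
-- 	ways += figure_ways(data[3:])
-- 	return ways
-- ===== SOURCE B (Python) =====
-- def figure_ways(data):
--     n = len(data)
--     if n == 0:
--         return 0
--     if n < 3:
--         return 1
--     a, b, c = 0, 1, 1  # ways for prefix lengths 0, 1, 2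
--     for _ in range(3, n + 1):
--         a, b, c = b, c, a + b + c
--     return c
-- ===== Notes on version B (the rewrite author's own statement) =====
-- stated objective: faster
-- what changed: replaced the exponential three-way recursion (which depends only on len(data)) by a linear tribonacci dynamic program keeping the last three counts
import Mathlib
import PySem

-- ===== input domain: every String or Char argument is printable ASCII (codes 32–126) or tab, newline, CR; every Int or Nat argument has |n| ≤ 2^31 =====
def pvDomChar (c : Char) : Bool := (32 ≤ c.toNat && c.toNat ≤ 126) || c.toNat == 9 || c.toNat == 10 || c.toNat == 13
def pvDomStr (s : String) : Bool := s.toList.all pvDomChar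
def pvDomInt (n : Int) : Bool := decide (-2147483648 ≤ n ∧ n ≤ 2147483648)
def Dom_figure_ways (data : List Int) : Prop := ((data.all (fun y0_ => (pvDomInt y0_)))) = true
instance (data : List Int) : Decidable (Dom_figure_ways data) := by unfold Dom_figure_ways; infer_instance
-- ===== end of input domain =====

-- B replaces A's exponential three-way recursion (which depends only on the list length)
-- by a linear tribonacci DP; objective: faster (asymptotic).

-- ===== PORT A =====
-- data[k:] for k ≥ 0 is exactly List.drop k
def figure_ways (data : List Int) : Int :=
  if data.length == 0 then 0
  else if data.length < 3 then 1
  else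
    figure_ways (data.drop 1) + figure_ways (data.drop 2) + figure_ways (data.drop 3)
termination_by data.length
decreasing_by all_goals simp_all; omega

-- ===== PORT B =====
def figure_ways_alt (data : List Int) : Int :=
  let n := data.length
  if n == 0 then 0
  else if n < 3 then 1
  else
    ((PySem.List.pyRange 3 ((n : Int) + 1) 1).foldl
      (fun (s : Int × Int × Int) _ => (s.2.1, s.2.2, s.1 + s.2.1 + s.2.2))
      (0, 1, 1)).2.2

-- ===== PRECONDITION & SPEC =====
def Spec_figure_ways (data : List Int) (out : Int) : Prop := out = figure_ways_alt data
instance (data : List Int) (out : Int) : Decidable (Spec_figure_ways data out) := by unfold Spec_figure_ways; infer_instance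

-- ===== CLAIM (what is proved, stated in full; the proofs are below) =====
def Claim_equal_figure_ways : Prop := ∀ (data : List Int), Dom_figure_ways data → Spec_figure_ways data (figure_ways data)

-- ===== LEMMAS AND PROOFS =====

-- the common value as a function of the length: tribonacci with g 0 = 0, g 1 = g 2 = 1
def pvG : Nat → Int
  | 0 => 0
  | 1 => 1
  | 2 => 1
  | (n + 3) => pvG (n + 2) + pvG (n + 1) + pvG n

theorem pvA_eq_g (data : List Int) : figure_ways data = pvG data.length := by
  fun_induction figure_ways data with
  | case1 data h =>
    simp at h
    simp [pvG, h]
  | case2 data h0 h3 =>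
    have h0' : data.length ≠ 0 := by simpa using h0
    obtain h | h : data.length = 1 ∨ data.length = 2 := by omega
    · simp [h, pvG]
    · simp [h, pvG]
  | case3 data h0 h3 ih1 ih2 ih3 =>
    rw [ih1, ih2, ih3]
    simp only [List.length_drop]
    simp at h0 h3
    obtain ⟨k, hk⟩ : ∃ k, data.length = k + 3 := ⟨data.length - 3, by omega⟩
    rw [hk]
    have e1 : k + 3 - 1 = k + 2 := by omega
    have e2 : k + 3 - 2 = k + 1 := by omega
    have e3 : k + 3 - 3 = k := by omega
    rw [e1, e2, e3]
    simp [pvG]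

theorem pvLoop_eq (k : Nat) :
    (PySem.List.pyRange 3 ((k : Int) + 3) 1).foldl
      (fun (s : Int × Int × Int) _ => (s.2.1, s.2.2, s.1 + s.2.1 + s.2.2))
      (0, 1, 1) = (pvG k, pvG (k + 1), pvG (k + 2)) := by
  induction k with
  | zero => simp [PySem.List.pyRange_one_eq_nil, pvG]
  | succ k ih =>
    have h : ((k + 1 : Nat) : Int) + 3 = ((k : Int) + 3) + 1 := by push_cast; ring
    rw [h, PySem.List.pyRange_one_succ_right (by omega)]
    rw [List.foldl_append, ih]
    simp only [List.foldl_cons, List.foldl_nil, pvG, Prod.mk.injEq]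
    exact ⟨trivial, trivial, by ring⟩

theorem pvAlt_eq_g (data : List Int) : figure_ways_alt data = pvG data.length := by
  by_cases h0 : data.length = 0
  · simp [figure_ways_alt, h0, pvG]
  · by_cases h3 : data.length < 3
    · obtain h | h : data.length = 1 ∨ data.length = 2 := by omega
      · simp [figure_ways_alt, h, pvG]
      · simp [figure_ways_alt, h, pvG]
    · obtain ⟨k, hk⟩ : ∃ k, data.length = k + 2 := ⟨data.length - 2, by omega⟩
      simp only [figure_ways_alt]
      rw [hk]
      have c1 : ¬ ((k + 2 : Nat) == 0) = true := by simp
      have c2 : ¬ (k + 2 < 3) := by omega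
      rw [if_neg c1, if_neg c2]
      have hc : ((k + 2 : Nat) : Int) + 1 = (k : Int) + 3 := by push_cast; ring
      rw [hc, pvLoop_eq]

-- ===== VERDICT (by name: the statement is the Claim_ definition above) =====
theorem figure_ways_spec : Claim_equal_figure_ways := by
  intro data _
  unfold Spec_figure_ways
  rw [pvA_eq_g, pvAlt_eq_g]
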